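-- pv_equiv track=rewrite | github.com/pypi-data/pypi-mirror-294 | packages/took/took-0.0.11.tar.gz/took-0.0.11/took/ui.py | aggregate_time_per_day
-- ===== SOURCE A (Python) =====
-- def aggregate_time_per_day(tasks, dates):
--     daily_totals = {date: {} for date in dates}
--     for task_name, task in tasks.items():
--         for date, seconds in task["log"].items():
--             if date in daily_totals:
--                 if task_name in daily_totals[date]:
--                     daily_totals[date][task_name] += seconds
--                 else:
--                     daily_totals[date][task_name] = seconds
--     return daily_totals
-- ===== SOURCE B (Python) =====
-- def aggregate_time_per_day(tasks, dates):
--     return {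
--         date: {
--             name: task["log"][date]
--             for name, task in tasks.items()
--             if date in task["log"]
--         }
--         for date in dates
--     }
-- ===== Notes on version B (the rewrite author's own statement) =====
-- stated objective: simpler
-- what changed: Inverted the loop nesting: B is a single nested dict comprehension driven by the dates (dates outer, tasks inner), pulling each task's seconds for the date by direct key lookup in task['log'], so the accumulation branches and the membership test against the result dict disappear.
import Mathlib
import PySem

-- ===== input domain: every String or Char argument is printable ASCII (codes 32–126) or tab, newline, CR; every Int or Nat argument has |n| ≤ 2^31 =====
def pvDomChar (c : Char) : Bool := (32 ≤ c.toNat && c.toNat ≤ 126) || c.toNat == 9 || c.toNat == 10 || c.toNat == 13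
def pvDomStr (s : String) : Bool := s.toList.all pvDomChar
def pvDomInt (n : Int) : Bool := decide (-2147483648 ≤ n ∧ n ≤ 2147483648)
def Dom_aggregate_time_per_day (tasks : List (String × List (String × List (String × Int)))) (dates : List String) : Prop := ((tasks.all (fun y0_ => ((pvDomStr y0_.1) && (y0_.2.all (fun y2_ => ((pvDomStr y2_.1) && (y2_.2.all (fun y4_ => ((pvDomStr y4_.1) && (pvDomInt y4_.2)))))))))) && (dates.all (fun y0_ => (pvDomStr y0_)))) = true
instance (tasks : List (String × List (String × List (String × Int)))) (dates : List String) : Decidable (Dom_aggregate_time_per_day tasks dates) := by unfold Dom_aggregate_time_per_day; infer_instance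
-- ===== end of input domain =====

-- B inverts the loop nesting (dates outer, tasks inner) and reads each task's seconds for a
-- date by direct lookup in the task's log, eliminating A's accumulation branches (simpler).

-- ===== PORT A =====
-- the body of A's inner 'for date, seconds in task["log"].items()' loop
def aggA_stepDate (task_name : String) (dt : PySem.Dict String (PySem.Dict String Int)) (q : String × Int) : PySem.Dict String (PySem.Dict String Int) :=
  if dt.contains q.1 then
    if (dt.getD q.1 PySem.Dict.empty).contains task_name then
      dt.insert q.1 ((dt.getD q.1 PySem.Dict.empty).insert task_name ((dt.getD q.1 PySem.Dict.empty).getD task_name 0 + q.2))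
    else
      dt.insert q.1 ((dt.getD q.1 PySem.Dict.empty).insert task_name q.2)
  else dt

-- the body of A's outer 'for task_name, task in tasks.items()' loop; a task without "log" is a
-- Python KeyError, excluded by Pre_ (the port skips the task there)
def aggA_stepTask (dt : PySem.Dict String (PySem.Dict String Int)) (p : String × List (String × List (String × Int))) : PySem.Dict String (PySem.Dict String Int) :=
  match (PySem.Dict.mk p.2).get? "log" with
  | some log => log.foldl (aggA_stepDate p.1) dt
  | none => dt

def aggregate_time_per_day (tasks : List (String × List (String × List (String × Int)))) (dates : List String) : List (String × List (String × Int)) :=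
  let daily_totals := dates.foldl (fun d date => d.insert date PySem.Dict.empty) PySem.Dict.empty
  ((tasks.foldl aggA_stepTask daily_totals).items).map (fun p => (p.1, p.2.items))

-- ===== PORT B =====
-- the inner comprehension of B: {name: task["log"][date] for name, task in tasks.items() if date in task["log"]}
def aggB_inner (tasks : List (String × List (String × List (String × Int)))) (date : String) : PySem.Dict String Int :=
  tasks.foldl (fun inn p =>
    match (PySem.Dict.mk p.2).get? "log" with
    | some log =>
      match (PySem.Dict.mk log).get? date with
      | some v => inn.insert p.1 v
      | none => inn
    | none => inn) PySem.Dict.empty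

def aggregate_time_per_day_alt (tasks : List (String × List (String × List (String × Int)))) (dates : List String) : List (String × List (String × Int)) :=
  ((dates.foldl (fun acc date => acc.insert date (aggB_inner tasks date)) PySem.Dict.empty).items).map (fun p => (p.1, p.2.items))

-- ===== PRECONDITION & SPEC =====
-- Pre_ excludes (a) tasks without a "log" key, on which Python A raises KeyError, and
-- (b) association lists with duplicate task names or duplicate dates inside one log, which do
-- not represent Python dicts (A's summing vs B's first-match there is an artefact of the encoding).
def Pre_aggregate_time_per_day (tasks : List (String × List (String × List (String × Int)))) (dates : List String) : Prop :=
  (tasks.map Prod.fst).Nodup ∧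
  ∀ t ∈ tasks, ((PySem.Dict.mk t.2).get? "log").isSome = true ∧
    ((((PySem.Dict.mk t.2).get? "log").getD []).map Prod.fst).Nodup
instance (tasks : List (String × List (String × List (String × Int)))) (dates : List String) : Decidable (Pre_aggregate_time_per_day tasks dates) := by unfold Pre_aggregate_time_per_day; infer_instance

def pvWitness_aggregate_time_per_day : (List (String × List (String × List (String × Int)))) × List String :=
  ([("a", [("log", [("d1", 5), ("d2", 2)])]), ("b", [("log", [("d1", 1)])])], ["d1", "d2", "d3"])

def Spec_aggregate_time_per_day (tasks : List (String × List (String × List (String × Int)))) (dates : List String) (out : List (String × List (String × Int))) : Prop := out = aggregate_time_per_day_alt tasks dates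
instance (tasks : List (String × List (String × List (String × Int)))) (dates : List String) (out : List (String × List (String × Int))) : Decidable (Spec_aggregate_time_per_day tasks dates out) := by unfold Spec_aggregate_time_per_day; infer_instance

-- ===== CLAIM (what is proved, stated in full; the proofs are below) =====
def Claim_equal_aggregate_time_per_day : Prop := ∀ (tasks : List (String × List (String × List (String × Int)))) (dates : List String), Dom_aggregate_time_per_day tasks dates → Pre_aggregate_time_per_day tasks dates → Spec_aggregate_time_per_day tasks dates (aggregate_time_per_day tasks dates)

-- ===== LEMMAS AND PROOFS =====

-- B's inner comprehension generalized to an arbitrary start dict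
def innFold (tasks : List (String × List (String × List (String × Int)))) (date : String) (inn0 : PySem.Dict String Int) : PySem.Dict String Int :=
  tasks.foldl (fun inn p =>
    match (PySem.Dict.mk p.2).get? "log" with
    | some log =>
      match (PySem.Dict.mk log).get? date with
      | some v => inn.insert p.1 v
      | none => inn
    | none => inn) inn0

theorem aggB_inner_eq_innFold (tasks : List (String × List (String × List (String × Int)))) (date : String) :
    aggB_inner tasks date = innFold tasks date PySem.Dict.empty := rfl

-- A's add-or-set branch pair as one function
def addA (inn : PySem.Dict String Int) (n : String) (v : Int) : PySem.Dict String Int :=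
  if inn.contains n then inn.insert n (inn.getD n 0 + v) else inn.insert n v

-- getD through a foldl of key-dependent inserts
theorem getD_foldl_insert_fun {ν : Type} (l : List String) (g : String → ν)
    (acc : PySem.Dict String ν) (d : String) (dflt : ν) :
    (l.foldl (fun a x => a.insert x (g x)) acc).getD d dflt
      = if d ∈ l then g d else acc.getD d dflt := by
  induction l generalizing acc with
  | nil => simp
  | cons x xs ih =>
    simp only [List.foldl_cons, ih, List.mem_cons, PySem.Dict.getD_insert]
    by_cases hx : d = x <;> by_cases hm : d ∈ xs <;> simp [hx, hm]

-- keys are unchanged by A's loops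
theorem keys_aggA_stepDate (n : String) (dt : PySem.Dict String (PySem.Dict String Int)) (q : String × Int) :
    (aggA_stepDate n dt q).keys = dt.keys := by
  unfold aggA_stepDate
  split_ifs with h1 h2
  · exact PySem.Dict.keys_insert_of_contains dt _ h1
  · exact PySem.Dict.keys_insert_of_contains dt _ h1
  · rfl

theorem keys_foldl_stepDate (n : String) (l : List (String × Int)) (dt : PySem.Dict String (PySem.Dict String Int)) :
    (l.foldl (aggA_stepDate n) dt).keys = dt.keys := by
  induction l generalizing dt with
  | nil => rfl
  | cons q l ih => simp [List.foldl_cons, ih, keys_aggA_stepDate]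

theorem keys_aggA_stepTask (dt : PySem.Dict String (PySem.Dict String Int)) (p : String × List (String × List (String × Int))) :
    (aggA_stepTask dt p).keys = dt.keys := by
  unfold aggA_stepTask
  cases h : (PySem.Dict.mk p.2).get? "log" with
  | none => rfl
  | some log => exact keys_foldl_stepDate _ _ _

theorem keys_foldl_stepTask (tasks : List (String × List (String × List (String × Int)))) (dt : PySem.Dict String (PySem.Dict String Int)) :
    (tasks.foldl aggA_stepTask dt).keys = dt.keys := by
  induction tasks generalizing dt with
  | nil => rfl
  | cons p l ih => simp [List.foldl_cons, ih, keys_aggA_stepTask]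

theorem contains_aggA_stepDate (n : String) (dt : PySem.Dict String (PySem.Dict String Int)) (q : String × Int) (d : String) :
    (aggA_stepDate n dt q).contains d = dt.contains d := by
  simp [PySem.Dict.contains_eq_decide_mem_keys, keys_aggA_stepDate]

theorem contains_aggA_stepTask (dt : PySem.Dict String (PySem.Dict String Int)) (p : String × List (String × List (String × Int))) (d : String) :
    (aggA_stepTask dt p).contains d = dt.contains d := by
  simp [PySem.Dict.contains_eq_decide_mem_keys, keys_aggA_stepTask]

-- getD through one aggA_stepDate step
theorem getD_aggA_stepDate (n : String) (dt : PySem.Dict String (PySem.Dict String Int)) (q : String × Int) (d : String) :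
    (aggA_stepDate n dt q).getD d PySem.Dict.empty
      = if dt.contains q.1 = true ∧ d = q.1 then addA (dt.getD d PySem.Dict.empty) n q.2
        else dt.getD d PySem.Dict.empty := by
  unfold aggA_stepDate addA
  by_cases hc : dt.contains q.1 = true
  · by_cases hd : d = q.1
    · subst hd
      simp only [hc, and_self, if_true]
      split_ifs with h <;> simp
    · simp only [hc, hd, and_false, if_false, if_true]
      split_ifs with h <;> simp [PySem.Dict.getD_insert, hd]
  · simp [hc]

-- getD through A's inner loop over one log with distinct dates
theorem getD_foldl_stepDate (n : String) (l : List (String × Int)) (dt : PySem.Dict String (PySem.Dict String Int)) (d : String)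
    (hnd : (l.map Prod.fst).Nodup) :
    (l.foldl (aggA_stepDate n) dt).getD d PySem.Dict.empty
      = if dt.contains d then
          (match (PySem.Dict.mk l).get? d with
           | some v => addA (dt.getD d PySem.Dict.empty) n v
           | none => dt.getD d PySem.Dict.empty)
        else dt.getD d PySem.Dict.empty := by
  induction l generalizing dt with
  | nil =>
    simp only [List.foldl_nil]
    split_ifs <;> rfl
  | cons q l ih =>
    obtain ⟨qd, qs⟩ := q
    simp only [List.map_cons, List.nodup_cons] at hnd
    rw [List.foldl_cons, ih _ hnd.2, contains_aggA_stepDate, getD_aggA_stepDate,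
      PySem.Dict.get?_mk_cons]
    by_cases hc : dt.contains d = true
    · by_cases hd : d = qd
      · have hqc : dt.contains qd = true := by rw [← hd]; exact hc
        have hnone : (PySem.Dict.mk l).get? qd = none := by
          rw [PySem.Dict.get?_eq_none_iff_not_mem_keys]
          simpa [PySem.Dict.keys] using hnd.1
        simp [hd, hqc, hnone]
      · have hne : (qd == d) = false := by simp [Ne.symm hd]
        simp [hc, hd, hne]
    · by_cases hd : d = qd
      · have hqc : dt.contains qd = false := by rw [← hd]; simpa using hc
        simp [hqc, hd]
      · simp [hc, hd]

-- names appearing in an inner dict after A's inner loop come from dt or are n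
theorem contains_getD_foldl_stepDate (n : String) (l : List (String × Int)) (dt : PySem.Dict String (PySem.Dict String Int)) (d m : String)
    (h : (((l.foldl (aggA_stepDate n) dt).getD d PySem.Dict.empty).contains m) = true) :
    ((dt.getD d PySem.Dict.empty).contains m) = true ∨ m = n := by
  induction l generalizing dt with
  | nil => exact Or.inl h
  | cons q l ih =>
    rcases ih _ h with h' | h'
    · rw [getD_aggA_stepDate] at h'
      split_ifs at h' with hq
      · unfold addA at h'
        split_ifs at h' with hm <;>
          · simp only [PySem.Dict.contains_insert, Bool.or_eq_true, beq_iff_eq] at h'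
            rcases h' with he | hin
            · exact Or.inr he
            · exact Or.inl hin
      · exact Or.inl h'
    · exact Or.inr h'

-- MAIN: A's whole fold, read back through getD, is B's inner fold at each contained date
theorem getD_foldl_stepTask (tasks : List (String × List (String × List (String × Int)))) (dt : PySem.Dict String (PySem.Dict String Int)) (d : String)
    (hnd : (tasks.map Prod.fst).Nodup)
    (hlog : ∀ t ∈ tasks, ((((PySem.Dict.mk t.2).get? "log").getD []).map Prod.fst).Nodup)
    (hfresh : ∀ t ∈ tasks, ∀ k, ((dt.getD k PySem.Dict.empty).contains t.1) = false) :
    (tasks.foldl aggA_stepTask dt).getD d PySem.Dict.empty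
      = if dt.contains d then innFold tasks d (dt.getD d PySem.Dict.empty)
        else dt.getD d PySem.Dict.empty := by
  induction tasks generalizing dt with
  | nil => simp [innFold]
  | cons p rest ih =>
    simp only [List.map_cons, List.nodup_cons] at hnd
    have hfresh' : ∀ t ∈ rest, ∀ k, (((aggA_stepTask dt p).getD k PySem.Dict.empty).contains t.1) = false := by
      intro t ht k
      by_contra hcon
      have hcon' : (((aggA_stepTask dt p).getD k PySem.Dict.empty).contains t.1) = true := by
        revert hcon; cases (((aggA_stepTask dt p).getD k PySem.Dict.empty).contains t.1) <;> simp
      unfold aggA_stepTask at hcon'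
      rcases hlp : (PySem.Dict.mk p.2).get? "log" with _ | log <;> rw [hlp] at hcon'
      · rw [hfresh t (List.mem_cons_of_mem _ ht) k] at hcon'; cases hcon'
      · rcases contains_getD_foldl_stepDate _ _ _ _ _ hcon' with hx | hx
        · rw [hfresh t (List.mem_cons_of_mem _ ht) k] at hx; cases hx
        · exact hnd.1 (hx ▸ (List.mem_map.2 ⟨t, ht, rfl⟩))
    have hstep : (aggA_stepTask dt p).getD d PySem.Dict.empty
        = if dt.contains d then
            (match (PySem.Dict.mk p.2).get? "log" with
             | some log =>
               (match (PySem.Dict.mk log).get? d with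
                | some v => (dt.getD d PySem.Dict.empty).insert p.1 v
                | none => dt.getD d PySem.Dict.empty)
             | none => dt.getD d PySem.Dict.empty)
          else dt.getD d PySem.Dict.empty := by
      unfold aggA_stepTask
      rcases hlp : (PySem.Dict.mk p.2).get? "log" with _ | log
      · simp
      · have hlnd : (log.map Prod.fst).Nodup := by
          have := hlog p (List.mem_cons_self ..)
          rwa [hlp] at this
        rw [getD_foldl_stepDate _ _ _ _ hlnd]
        rcases hgd : (PySem.Dict.mk log).get? d with _ | v
        · simp [hgd]
        · have haddA : addA (dt.getD d PySem.Dict.empty) p.1 v = (dt.getD d PySem.Dict.empty).insert p.1 v := by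
            unfold addA
            rw [hfresh p (List.mem_cons_self ..) d]
            simp
          simp [hgd, haddA]
    rw [List.foldl_cons,
      ih _ hnd.2 (fun t ht => hlog t (List.mem_cons_of_mem _ ht)) hfresh',
      contains_aggA_stepTask, hstep]
    by_cases hc : dt.contains d = true
    · simp only [hc, if_true, innFold, List.foldl_cons]
    · simp [hc]

-- the two final dicts are equal
theorem FA_eq_FB (tasks : List (String × List (String × List (String × Int)))) (dates : List String)
    (hnd : (tasks.map Prod.fst).Nodup)
    (hlog : ∀ t ∈ tasks, ((((PySem.Dict.mk t.2).get? "log").getD []).map Prod.fst).Nodup) :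
    tasks.foldl aggA_stepTask (dates.foldl (fun d date => d.insert date PySem.Dict.empty) PySem.Dict.empty)
      = dates.foldl (fun acc date => acc.insert date (aggB_inner tasks date)) PySem.Dict.empty := by
  have hkinit : (dates.foldl (fun d date => d.insert date PySem.Dict.empty) (PySem.Dict.empty : PySem.Dict String (PySem.Dict String Int))).keys = PySem.Set.ofList dates := by
    have := PySem.Dict.keys_foldl_insert (ν := PySem.Dict String Int) dates
      (fun _ _ => PySem.Dict.empty) PySem.Dict.empty
    simpa [PySem.Set.update_nil_left] using this
  have hginit : ∀ k, (dates.foldl (fun d date => d.insert date PySem.Dict.empty) (PySem.Dict.empty : PySem.Dict String (PySem.Dict String Int))).getD k PySem.Dict.empty = PySem.Dict.empty := by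
    intro k
    have := getD_foldl_insert_fun dates (fun _ => (PySem.Dict.empty : PySem.Dict String Int))
      PySem.Dict.empty k PySem.Dict.empty
    simpa using this
  have hcinit : ∀ k, (dates.foldl (fun d date => d.insert date PySem.Dict.empty) (PySem.Dict.empty : PySem.Dict String (PySem.Dict String Int))).contains k = decide (k ∈ dates) := by
    intro k
    rw [PySem.Dict.contains_eq_decide_mem_keys, hkinit]
    simp [PySem.Set.mem_ofList]
  have hkA : (tasks.foldl aggA_stepTask (dates.foldl (fun d date => d.insert date PySem.Dict.empty) PySem.Dict.empty)).keys = PySem.Set.ofList dates := by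
    rw [keys_foldl_stepTask, hkinit]
  have hkB : (dates.foldl (fun acc date => acc.insert date (aggB_inner tasks date)) PySem.Dict.empty).keys = PySem.Set.ofList dates := by
    have := PySem.Dict.keys_foldl_insert (ν := PySem.Dict String Int) dates
      (fun _ date => aggB_inner tasks date) PySem.Dict.empty
    simpa [PySem.Set.update_nil_left] using this
  have hgA : ∀ k, (tasks.foldl aggA_stepTask (dates.foldl (fun d date => d.insert date PySem.Dict.empty) PySem.Dict.empty)).getD k PySem.Dict.empty
      = if k ∈ dates then innFold tasks k PySem.Dict.empty else PySem.Dict.empty := by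
    intro k
    rw [getD_foldl_stepTask tasks _ k hnd hlog
      (by intro t _ k'; rw [hginit k']; exact PySem.Dict.contains_empty _),
      hcinit k, hginit k]
    by_cases hk : k ∈ dates <;> simp [hk]
  have hgB : ∀ k, (dates.foldl (fun acc date => acc.insert date (aggB_inner tasks date)) PySem.Dict.empty).getD k PySem.Dict.empty
      = if k ∈ dates then innFold tasks k PySem.Dict.empty else PySem.Dict.empty := by
    intro k
    have := getD_foldl_insert_fun dates (fun date => aggB_inner tasks date)
      PySem.Dict.empty k PySem.Dict.empty
    simpa [aggB_inner_eq_innFold] using this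
  apply PySem.Dict.ext
  rw [PySem.Dict.items_eq_map_keys _ (by rw [hkA]; exact PySem.Set.nodup_ofList dates) PySem.Dict.empty,
    PySem.Dict.items_eq_map_keys _ (by rw [hkB]; exact PySem.Set.nodup_ofList dates) PySem.Dict.empty,
    hkA, hkB]
  apply List.map_congr_left
  intro k _
  rw [hgA k, hgB k]

-- ===== VERDICT (by name: the statement is the Claim_ definition above) =====
theorem aggregate_time_per_day_spec : Claim_equal_aggregate_time_per_day := by
  unfold Claim_equal_aggregate_time_per_day
  intro tasks dates _hdom hpre
  obtain ⟨hnd, hpre2⟩ := hpre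
  unfold Spec_aggregate_time_per_day
  simp only [aggregate_time_per_day, aggregate_time_per_day_alt]
  rw [FA_eq_FB tasks dates hnd (fun t ht => (hpre2 t ht).2)]
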